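-- pv_equiv track=rewrite | github.com/akent4000/Universal-Gate-Compiler | nand_optimizer/core/implicant.py | _expand_cubes_to_set
-- ===== SOURCE A (Python) =====
-- from typing import Dict, FrozenSet, List, Set, Tuple
--
-- DASH = -1  # wildcard / don't-care position in a ternary cube
--
-- def _expand_cubes_to_set(cubes: List[Tuple[int, ...]], n_vars: int) -> Set[int]:
--     """Expand ternary cubes to the set of minterm integers they cover.
--
--     Only call for small n (n <= 20); for large n the result is exponential.
--     """
--     result: Set[int] = set()
--     for cube in cubes:
--         minterms = [0]
--         for i, b in enumerate(cube):        # i=0 is MSB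
--             bit_pos = n_vars - 1 - i
--             if b == DASH:
--                 minterms = minterms + [m | (1 << bit_pos) for m in minterms]
--             elif b == 1:
--                 minterms = [m | (1 << bit_pos) for m in minterms]
--             # b == 0: bit stays 0
--         result.update(minterms)
--     return result
-- ===== SOURCE B (Python) =====
-- from typing import List, Set, Tuple
--
-- DASH = -1  # wildcard / don't-care position in a ternary cube
--
-- def _expand_cubes_to_set(cubes: List[Tuple[int, ...]], n_vars: int) -> Set[int]:
--     """Expand ternary cubes to covered minterms: one pass per cube computes a
--     base value and the list of dash bit-positions; then every subset of the
--     dash positions is enumerated by a mask counter."""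
--     result: Set[int] = set()
--     for cube in cubes:
--         base = 0
--         dash_positions: List[int] = []
--         for i, b in enumerate(cube):        # i=0 is MSB
--             bit_pos = n_vars - 1 - i
--             if b == DASH:
--                 dash_positions.append(bit_pos)
--             elif b == 1:
--                 base |= 1 << bit_pos
--         for mask in range(1 << len(dash_positions)):
--             m = base
--             bits = mask
--             for p in dash_positions:
--                 if bits & 1:
--                     m |= 1 << p
--                 bits >>= 1
--             result.add(m)
--     return result
-- ===== Notes on version B (the rewrite author's own statement) =====
-- stated objective: alternative
-- what changed: Replaces A's repeated doubling of a growing minterm list (list rebuilt at every dash/one position) by a single pass per cube that extracts a base value and the dash bit-positions, then enumerates the covered minterms with a mask counter over the dash subsets.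
import Mathlib
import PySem

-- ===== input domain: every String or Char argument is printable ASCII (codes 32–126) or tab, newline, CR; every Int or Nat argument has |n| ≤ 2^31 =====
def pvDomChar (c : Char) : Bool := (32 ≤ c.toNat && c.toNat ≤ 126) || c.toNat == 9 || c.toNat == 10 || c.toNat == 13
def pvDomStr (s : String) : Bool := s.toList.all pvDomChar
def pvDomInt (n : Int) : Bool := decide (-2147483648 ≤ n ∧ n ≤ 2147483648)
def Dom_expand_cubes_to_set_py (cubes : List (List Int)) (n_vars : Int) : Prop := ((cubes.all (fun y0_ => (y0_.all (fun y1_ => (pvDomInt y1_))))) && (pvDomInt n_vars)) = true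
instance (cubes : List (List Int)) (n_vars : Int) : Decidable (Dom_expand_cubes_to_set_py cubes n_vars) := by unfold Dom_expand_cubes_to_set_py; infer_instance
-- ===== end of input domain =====

-- B replaces A's doubling-list growth by a base-plus-dash-positions pass and a mask-counter
-- subset enumeration (alternative decomposition, same asymptotic cost).

-- ===== PORT A =====
def expand_cubes_to_set_py (cubes : List (List Int)) (n_vars : Int) : List Int :=
  cubes.foldl (fun result cube =>
    PySem.Set.update result
      ((PySem.List.enumerate cube 0).foldl (fun minterms ib =>
        if ib.2 = -1 then
          minterms ++ minterms.map (fun m => PySem.Int.bor m ((1 : Int) <<< (n_vars - 1 - ib.1).toNat))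
        else if ib.2 = 1 then
          minterms.map (fun m => PySem.Int.bor m ((1 : Int) <<< (n_vars - 1 - ib.1).toNat))
        else minterms) [0])) []

-- ===== PORT B =====
def expand_cubes_to_set_py_alt (cubes : List (List Int)) (n_vars : Int) : List Int :=
  cubes.foldl (fun result cube =>
    ((fun (bd : Int × List Int) =>
      (PySem.List.pyRange 0 ((1 : Int) <<< bd.2.length) 1).foldl (fun result mask =>
        PySem.Set.add result
          ((bd.2.foldl (fun (mb : Int × Int) p =>
            (if PySem.Int.band mb.2 1 ≠ 0 then PySem.Int.bor mb.1 ((1 : Int) <<< (p.toNat : Nat)) else mb.1,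
             mb.2 >>> (1 : Nat))) (bd.1, mask)).1)) result)
      ((PySem.List.enumerate cube 0).foldl (fun bd ib =>
        if ib.2 = -1 then (bd.1, bd.2 ++ [n_vars - 1 - ib.1])
        else if ib.2 = 1 then (PySem.Int.bor bd.1 ((1 : Int) <<< (n_vars - 1 - ib.1).toNat), bd.2)
        else bd) ((0 : Int), ([] : List Int))))) []

-- ===== PRECONDITION & SPEC =====
-- Pre_ excludes exactly the inputs where Python A raises a ValueError: a cube entry equal
-- to 1 or -1 at an index i with n_vars - 1 - i < 0 makes A evaluate 1 << (negative).
def Pre_expand_cubes_to_set_py (cubes : List (List Int)) (n_vars : Int) : Prop :=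
  ∀ cube ∈ cubes, ∀ i : Fin cube.length, (cube[i.1] = 1 ∨ cube[i.1] = -1) → (i.1 : Int) < n_vars
instance (cubes : List (List Int)) (n_vars : Int) : Decidable (Pre_expand_cubes_to_set_py cubes n_vars) := by unfold Pre_expand_cubes_to_set_py; infer_instance
def pvWitness_expand_cubes_to_set_py : List (List Int) × Int := ([[1, -1, 0], [0, 1, 1]], 3)

def Spec_expand_cubes_to_set_py (cubes : List (List Int)) (n_vars : Int) (out : List Int) : Prop := out = expand_cubes_to_set_py_alt cubes n_vars
instance (cubes : List (List Int)) (n_vars : Int) (out : List Int) : Decidable (Spec_expand_cubes_to_set_py cubes n_vars out) := by unfold Spec_expand_cubes_to_set_py; infer_instance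

-- ===== CLAIM (what is proved, stated in full; the proofs are below) =====
def Claim_equal_expand_cubes_to_set_py : Prop := ∀ (cubes : List (List Int)) (n_vars : Int), Dom_expand_cubes_to_set_py cubes n_vars → Pre_expand_cubes_to_set_py cubes n_vars → Spec_expand_cubes_to_set_py cubes n_vars (expand_cubes_to_set_py cubes n_vars)

-- ===== LEMMAS AND PROOFS =====

-- Nat-level reference objects (proofs only).
def pvBit (nv i : Int) : Nat := 2 ^ (nv - 1 - i).toNat

def pvBaseN (nv : Int) : List (Int × Int) → Nat → Nat
  | [], b => b
  | p :: ps, b => pvBaseN nv ps (if p.2 = -1 then b else if p.2 = 1 then b ||| pvBit nv p.1 else b)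

def pvPosL (nv : Int) : List (Int × Int) → List Int
  | [] => []
  | p :: ps => if p.2 = -1 then (nv - 1 - p.1) :: pvPosL nv ps else pvPosL nv ps

def pvDashBits (nv : Int) (ps : List (Int × Int)) : List Nat :=
  (pvPosL nv ps).map (fun p => 2 ^ p.toNat)

def pvStepsA (nv : Int) : List (Int × Int) → List Nat → List Nat
  | [], L => L
  | p :: ps, L =>
    pvStepsA nv ps (if p.2 = -1 then L ++ L.map (· ||| pvBit nv p.1)
      else if p.2 = 1 then L.map (· ||| pvBit nv p.1) else L)

def pvSubs : List Nat → List Nat → List Nat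
  | [], S => S
  | d :: ds, S => pvSubs ds (S ++ S.map (· ||| d))

def pvMixN (A S : List Nat) : List Nat := S.flatMap (fun s => A.map (fun a => a ||| s))

def pvMv : List Nat → Nat → Nat
  | [], _ => 0
  | d :: ds, j => (if j % 2 = 1 then d else 0) ||| pvMv ds (j / 2)

def pvG : List Nat → Nat → Nat → Nat
  | [], b, _ => b
  | d :: ds, b, j => pvG ds (if j % 2 = 1 then b ||| d else b) (j / 2)

theorem pv_shl (k : Nat) : (1 : Int) <<< k = ((2 ^ k : Nat) : Int) := by
  rw [Int.shiftLeft_eq]; push_cast; ring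

theorem pv_bor_cast (a k : Nat) :
    PySem.Int.bor ((a : Nat) : Int) ((1 : Int) <<< k) = ((a ||| 2 ^ k : Nat) : Int) := by
  rw [pv_shl, PySem.Int.bor_natCast]

theorem pv_mix_dash (A S : List Nat) (d : Nat) :
    pvMixN A S ++ (pvMixN A S).map (· ||| d) = pvMixN A (S ++ S.map (· ||| d)) := by
  simp only [pvMixN, List.flatMap_append, List.map_flatMap, List.flatMap_map,
    List.map_map, Function.comp_def]
  congr 1
  refine List.flatMap_congr ?_
  intro s _
  refine List.map_congr_left ?_
  intro a _
  rw [Nat.lor_assoc]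

theorem pv_mix_one (A S : List Nat) (d : Nat) :
    (pvMixN A S).map (· ||| d) = pvMixN (A.map (· ||| d)) S := by
  simp only [pvMixN, List.map_flatMap, List.map_map, Function.comp_def]
  refine List.flatMap_congr ?_
  intro s _
  refine List.map_congr_left ?_
  intro a _
  rw [Nat.lor_assoc, Nat.lor_assoc, Nat.lor_comm s d]

theorem pvDashBits_cons (nv : Int) (p : Int × Int) (ps : List (Int × Int)) :
    pvDashBits nv (p :: ps) =
      if p.2 = -1 then pvBit nv p.1 :: pvDashBits nv ps else pvDashBits nv ps := by
  by_cases h : p.2 = -1 <;> simp [pvDashBits, pvPosL, pvBit, h]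

theorem pv_steps_mix (nv : Int) (ps : List (Int × Int)) :
    ∀ (A S : List Nat),
      pvStepsA nv ps (pvMixN A S) =
        pvMixN (A.map (fun a => pvBaseN nv ps a)) (pvSubs (pvDashBits nv ps) S) := by
  induction ps with
  | nil => intro A S; simp [pvStepsA, pvBaseN, pvDashBits, pvPosL, pvSubs]
  | cons p ps ih =>
    intro A S
    rw [pvStepsA, pvDashBits_cons]
    by_cases hd : p.2 = -1
    · rw [if_pos hd, if_pos hd, pv_mix_dash, ih, pvSubs]
      simp only [pvBaseN, if_pos hd]
    · by_cases ho : p.2 = 1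
      · rw [if_neg hd, if_neg hd, if_pos ho, pv_mix_one, ih, List.map_map]
        simp only [pvBaseN, if_neg hd, if_pos ho, Function.comp_def]
      · rw [if_neg hd, if_neg hd, if_neg ho, ih]
        simp only [pvBaseN, if_neg hd, if_neg ho]

theorem pv_range_pair {α : Type} (m : Nat) (h : Nat → List α) :
    (List.range (2 * m)).flatMap h = (List.range m).flatMap (fun q => h (2 * q) ++ h (2 * q + 1)) := by
  induction m with
  | zero => simp
  | succ m ih =>
    have : 2 * (m + 1) = (2 * m + 1) + 1 := by ring
    rw [this, List.range_succ, List.range_succ, List.range_succ]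
    simp [List.flatMap_append, ih]

theorem pv_subs_range (ds : List Nat) :
    ∀ S : List Nat,
      pvSubs ds S = (List.range (2 ^ ds.length)).flatMap (fun j => S.map (· ||| pvMv ds j)) := by
  induction ds with
  | nil => intro S; simp [pvSubs, pvMv, List.range_succ]
  | cons d ds ih =>
    intro S
    have h2 : 2 ^ (d :: ds).length = 2 * 2 ^ ds.length := by
      simp [List.length_cons, pow_succ]; ring
    rw [pvSubs, ih, h2, pv_range_pair]
    refine List.flatMap_congr ?_
    intro q _
    have hm0 : pvMv (d :: ds) (2 * q) = pvMv ds q := by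
      simp [pvMv, Nat.mul_div_cancel_left q (by norm_num : 0 < 2), Nat.mul_mod_right]
    have hm1 : pvMv (d :: ds) (2 * q + 1) = d ||| pvMv ds q := by
      have : (2 * q + 1) / 2 = q := by omega
      simp [pvMv, this, Nat.mul_add_mod]
    rw [hm0, hm1]
    simp [List.map_map, Function.comp_def, Nat.lor_assoc]

theorem pv_g_mv (ds : List Nat) : ∀ (b j : Nat), pvG ds b j = b ||| pvMv ds j := by
  induction ds with
  | nil => intro b j; simp [pvG, pvMv]
  | cons d ds ih =>
    intro b j
    rw [pvG, pvMv, ih]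
    by_cases h : j % 2 = 1 <;> simp [h, Nat.lor_assoc]

-- bridge: A's Int inner fold is the cast of pvStepsA
theorem pv_bridgeA (nv : Int) (ps : List (Int × Int)) :
    ∀ L : List Nat,
      ps.foldl (fun minterms ib =>
        if ib.2 = -1 then
          minterms ++ minterms.map (fun m => PySem.Int.bor m ((1 : Int) <<< (nv - 1 - ib.1).toNat))
        else if ib.2 = 1 then
          minterms.map (fun m => PySem.Int.bor m ((1 : Int) <<< (nv - 1 - ib.1).toNat))
        else minterms) (L.map (fun n : Nat => (n : Int))) =
      (pvStepsA nv ps L).map (fun n : Nat => (n : Int)) := by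
  induction ps with
  | nil => intro L; simp [pvStepsA]
  | cons p ps ih =>
    intro L
    rw [List.foldl_cons, pvStepsA]
    by_cases hd : p.2 = -1
    · rw [if_pos hd, if_pos hd, ← ih (L ++ L.map (· ||| pvBit nv p.1))]
      congr 1
      simp [pvBit, pv_bor_cast, List.map_map, Function.comp_def]
    · by_cases ho : p.2 = 1
      · rw [if_neg hd, if_neg hd, if_pos ho, if_pos ho, ← ih (L.map (· ||| pvBit nv p.1))]
        congr 1
        simp [pvBit, pv_bor_cast, List.map_map, Function.comp_def]
      · rw [if_neg hd, if_neg hd, if_neg ho, if_neg ho]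
        exact ih L

-- bridge: B's first fold computes the cast base and the dash positions
theorem pv_bridgeB1 (nv : Int) (ps : List (Int × Int)) :
    ∀ (b : Nat) (l : List Int),
      ps.foldl (fun (bd : Int × List Int) ib =>
        if ib.2 = -1 then (bd.1, bd.2 ++ [nv - 1 - ib.1])
        else if ib.2 = 1 then (PySem.Int.bor bd.1 ((1 : Int) <<< (nv - 1 - ib.1).toNat), bd.2)
        else bd) (((b : Nat) : Int), l) =
      (((pvBaseN nv ps b : Nat) : Int), l ++ pvPosL nv ps) := by
  induction ps with
  | nil => intro b l; simp [pvBaseN, pvPosL]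
  | cons p ps ih =>
    intro b l
    rw [List.foldl_cons, pvBaseN, pvPosL]
    by_cases hd : p.2 = -1
    · rw [if_pos hd, if_pos hd, if_pos hd]
      rw [ih b (l ++ [nv - 1 - p.1])]
      simp
    · by_cases ho : p.2 = 1
      · rw [if_neg hd, if_neg hd, if_neg hd, if_pos ho, if_pos ho]
        rw [show (PySem.Int.bor (((b : Nat) : Int)) ((1 : Int) <<< (nv - 1 - p.1).toNat)) =
            (((b ||| 2 ^ (nv - 1 - p.1).toNat : Nat) : Int)) from pv_bor_cast b _]
        exact ih _ l
      · rw [if_neg hd, if_neg hd, if_neg hd, if_neg ho, if_neg ho]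
        exact ih b l

-- bridge: B's mask fold computes pvG over the dash bits
theorem pv_bridgeB2 (posl : List Int) :
    ∀ (b j : Nat),
      posl.foldl (fun (mb : Int × Int) p =>
        (if PySem.Int.band mb.2 1 ≠ 0 then PySem.Int.bor mb.1 ((1 : Int) <<< (p.toNat : Nat)) else mb.1,
         mb.2 >>> (1 : Nat))) (((b : Nat) : Int), ((j : Nat) : Int)) =
      (((pvG (posl.map (fun p => 2 ^ p.toNat)) b j : Nat) : Int), ((j / 2 ^ posl.length : Nat) : Int)) := by
  induction posl with
  | nil => intro b j; simp [pvG]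
  | cons p posl ih =>
    intro b j
    rw [List.foldl_cons]
    have hcond : (PySem.Int.band ((j : Nat) : Int) 1 ≠ 0) ↔ j % 2 = 1 := by
      have hband : PySem.Int.band ((j : Nat) : Int) 1 = ((j &&& 1 : Nat) : Int) := by
        have := PySem.Int.band_natCast j 1
        simpa using this
      rw [hband, Nat.and_one_is_mod]
      omega
    have hshift : (((j : Nat) : Int)) >>> (1 : Nat) = ((j / 2 : Nat) : Int) := by
      rw [Int.shiftRight_eq_div_pow, pow_one]
      omega
    have hlen : 2 ^ (p :: posl).length = 2 ^ posl.length * 2 := by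
      simp [List.length_cons, pow_succ]
    by_cases hj : j % 2 = 1
    · rw [if_pos (hcond.mpr hj), hshift, pv_bor_cast b _, ih (b ||| 2 ^ p.toNat) (j / 2)]
      simp only [List.map_cons, pvG, List.length_cons, hj, if_pos, reduceIte]
      rw [Nat.div_div_eq_div_mul, pow_succ]
      simp [Nat.mul_comm]
    · rw [if_neg (fun h => hj (hcond.mp h)), hshift, ih b (j / 2)]
      simp only [List.map_cons, pvG, List.length_cons, hj, reduceIte]
      rw [Nat.div_div_eq_div_mul, pow_succ]
      simp [Nat.mul_comm]

theorem pv_fm (l : List Nat) (f : Nat → Nat) :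
    l.flatMap (fun s => [f s]) = l.map f := by
  induction l with
  | nil => rfl
  | cons x l ih => simp [List.flatMap_cons, ih]

-- the per-cube combinatorial identity
theorem pv_stepsA_range (nv : Int) (ps : List (Int × Int)) :
    pvStepsA nv ps [0] =
      (List.range (2 ^ (pvDashBits nv ps).length)).map
        (fun j => pvG (pvDashBits nv ps) (pvBaseN nv ps 0) j) := by
  have h0 : ([0] : List Nat) = pvMixN [0] [0] := by simp [pvMixN]
  rw [h0, pv_steps_mix, pv_subs_range]
  simp only [pvMixN, List.map_cons, List.map_nil]
  rw [pv_fm, pv_fm, List.map_map]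
  refine List.map_congr_left ?_
  intro j _
  simp [Function.comp_def, pv_g_mv]

theorem pv_pyRange_pow (k : Nat) :
    PySem.List.pyRange 0 ((1 : Int) <<< k) 1 = (List.range (2 ^ k)).map (fun j : Nat => (j : Int)) := by
  rw [pv_shl, PySem.List.pyRange_one]
  simp only [sub_zero, Int.toNat_natCast, zero_add]

-- per-cube: the two Int minterm lists coincide
theorem pv_per_cube (nv : Int) (cube : List Int) (result : List Int) :
    PySem.Set.update result
      ((PySem.List.enumerate cube 0).foldl (fun minterms ib =>
        if ib.2 = -1 then
          minterms ++ minterms.map (fun m => PySem.Int.bor m ((1 : Int) <<< (nv - 1 - ib.1).toNat))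
        else if ib.2 = 1 then
          minterms.map (fun m => PySem.Int.bor m ((1 : Int) <<< (nv - 1 - ib.1).toNat))
        else minterms) [0]) =
    ((fun (bd : Int × List Int) =>
      (PySem.List.pyRange 0 ((1 : Int) <<< bd.2.length) 1).foldl (fun result mask =>
        PySem.Set.add result
          ((bd.2.foldl (fun (mb : Int × Int) p =>
            (if PySem.Int.band mb.2 1 ≠ 0 then PySem.Int.bor mb.1 ((1 : Int) <<< (p.toNat : Nat)) else mb.1,
             mb.2 >>> (1 : Nat))) (bd.1, mask)).1)) result)
      ((PySem.List.enumerate cube 0).foldl (fun bd ib =>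
        if ib.2 = -1 then (bd.1, bd.2 ++ [nv - 1 - ib.1])
        else if ib.2 = 1 then (PySem.Int.bor bd.1 ((1 : Int) <<< (nv - 1 - ib.1).toNat), bd.2)
        else bd) ((0 : Int), ([] : List Int)))) := by
  set ps := PySem.List.enumerate cube 0 with hps
  -- B's first fold
  have hB1 : ps.foldl (fun bd ib =>
      if ib.2 = -1 then (bd.1, bd.2 ++ [nv - 1 - ib.1])
      else if ib.2 = 1 then (PySem.Int.bor bd.1 ((1 : Int) <<< (nv - 1 - ib.1).toNat), bd.2)
      else bd) ((0 : Int), ([] : List Int)) =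
      (((pvBaseN nv ps 0 : Nat) : Int), pvPosL nv ps) := by
    have := pv_bridgeB1 nv ps 0 []
    simpa using this
  rw [hB1]
  -- A's inner fold
  have hA : ps.foldl (fun minterms ib =>
      if ib.2 = -1 then
        minterms ++ minterms.map (fun m => PySem.Int.bor m ((1 : Int) <<< (nv - 1 - ib.1).toNat))
      else if ib.2 = 1 then
        minterms.map (fun m => PySem.Int.bor m ((1 : Int) <<< (nv - 1 - ib.1).toNat))
      else minterms) [0] = (pvStepsA nv ps [0]).map (fun n : Nat => (n : Int)) := by
    have h0 : ([(0 : Int)]) = (([0] : List Nat).map (fun n : Nat => (n : Int))) := by simp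
    rw [h0, pv_bridgeA]
  rw [hA, pv_stepsA_range]
  -- B's mask loop, rewritten through the range cast
  have hlen : (pvPosL nv ps).length = (pvDashBits nv ps).length := by
    simp [pvDashBits]
  simp only at hB1 ⊢
  rw [hlen, pv_pyRange_pow, List.foldl_map]
  -- both sides are a foldl of Set.add over the same list of values
  have hvals : ∀ j : Nat,
      ((pvPosL nv ps).foldl (fun (mb : Int × Int) p =>
        (if PySem.Int.band mb.2 1 ≠ 0 then PySem.Int.bor mb.1 ((1 : Int) <<< (p.toNat : Nat)) else mb.1,
         mb.2 >>> (1 : Nat))) (((pvBaseN nv ps 0 : Nat) : Int), ((j : Nat) : Int))).1 =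
      ((pvG (pvDashBits nv ps) (pvBaseN nv ps 0) j : Nat) : Int) := by
    intro j
    rw [pv_bridgeB2]
    simp [pvDashBits]
  have hupdate : ∀ (r : List Int) (xs : List Int),
      PySem.Set.update r xs = xs.foldl PySem.Set.add r := fun _ _ => rfl
  rw [hupdate, List.foldl_map, List.foldl_map]
  refine List.foldl_ext _ _ _ ?_
  intro r j _
  rw [hvals j]

theorem pv_main (cubes : List (List Int)) (n_vars : Int) :
    expand_cubes_to_set_py cubes n_vars = expand_cubes_to_set_py_alt cubes n_vars := by
  unfold expand_cubes_to_set_py expand_cubes_to_set_py_alt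
  induction cubes using List.reverseRecOn with
  | nil => rfl
  | append_singleton cs c ih =>
    rw [List.foldl_append, List.foldl_append, ih]
    simp only [List.foldl_cons, List.foldl_nil]
    exact pv_per_cube n_vars c _

-- ===== VERDICT (by name: the statement is the Claim_ definition above) =====
theorem expand_cubes_to_set_py_spec : Claim_equal_expand_cubes_to_set_py := by
  intro cubes n_vars _ _
  unfold Spec_expand_cubes_to_set_py
  exact pv_main cubes n_vars
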